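-- pv_equiv track=rewrite | github.com/Vk2k5/versionforge | feedback.summary.py | summarize_feedback
-- ===== SOURCE A (Python) =====
-- def summarize_feedback(feedback_data):
--
--     top_scores = sorted(feedback_data, key=lambda x: x[2], reverse=True)[:5]
--
--     grade_count = {"A": 0, "B": 0, "C": 0, "D": 0, "F": 0}
--
--     for _, _, score in feedback_data:
--         if score >= 90:
--             grade_count["A"] += 1
--         elif score >= 80:
--             grade_count["B"] += 1
--         elif score >= 70:
--             grade_count["C"] += 1
--         elif score >= 60:
--             grade_count["D"] += 1
--         else:
--             grade_count["F"] += 1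
--
--     return top_scores, grade_count
-- ===== SOURCE B (Python) =====
-- def summarize_feedback(feedback_data):
--     top_scores = sorted(feedback_data, key=lambda x: x[2], reverse=True)[:5]
--     # Staged cumulative counting: count how many scores clear each threshold,
--     # then each grade bucket is a difference of consecutive cumulative counts.
--     def count_ge(t):
--         return sum(1 for _, _, s in feedback_data if s >= t)
--     n90 = count_ge(90)
--     n80 = count_ge(80)
--     n70 = count_ge(70)
--     n60 = count_ge(60)
--     return top_scores, {"A": n90, "B": n80 - n90, "C": n70 - n80,
--                         "D": n60 - n70, "F": len(feedback_data) - n60}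
-- ===== Notes on version B (the rewrite author's own statement) =====
-- stated objective: alternative
-- what changed: A's single pass with a five-way if/elif cascade bucketing each score into a mutated dict is replaced by staged cumulative counting: four independent passes count how many scores reach each threshold (>=90,80,70,60), and each grade count is the difference of consecutive cumulative counts; no per-element branching into buckets and no dict mutation.
import Mathlib
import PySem

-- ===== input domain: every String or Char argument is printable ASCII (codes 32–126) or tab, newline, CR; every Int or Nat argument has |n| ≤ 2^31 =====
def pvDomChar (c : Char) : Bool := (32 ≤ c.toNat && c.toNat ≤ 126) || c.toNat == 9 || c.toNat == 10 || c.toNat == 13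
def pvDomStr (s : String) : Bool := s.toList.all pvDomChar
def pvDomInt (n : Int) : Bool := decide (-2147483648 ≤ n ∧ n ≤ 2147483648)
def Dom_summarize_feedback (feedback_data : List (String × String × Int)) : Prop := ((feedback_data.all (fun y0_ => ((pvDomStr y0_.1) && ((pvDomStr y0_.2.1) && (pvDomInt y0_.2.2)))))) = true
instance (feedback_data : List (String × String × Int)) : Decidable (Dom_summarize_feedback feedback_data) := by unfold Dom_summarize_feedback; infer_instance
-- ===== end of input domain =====

-- B replaces A's per-element five-way if/elif bucketing into a mutated dict by staged
-- cumulative threshold counts whose consecutive differences are the grade counts; same cost.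

-- ===== PORT A =====
-- the loop body of A: the if/elif cascade updating the grade dict
def pvStepA (d : PySem.Dict String Int) (x : String × String × Int) : PySem.Dict String Int :=
  let score := x.2.2
  if score ≥ 90 then d.modify "A" 0 (· + 1)
  else if score ≥ 80 then d.modify "B" 0 (· + 1)
  else if score ≥ 70 then d.modify "C" 0 (· + 1)
  else if score ≥ 60 then d.modify "D" 0 (· + 1)
  else d.modify "F" 0 (· + 1)

def summarize_feedback (feedback_data : List (String × String × Int)) :
    (List (String × String × Int)) × (List (String × Int)) :=
  -- sorted(feedback_data, key=lambda x: x[2], reverse=True)[:5]  ([:5] = take 5, exact for a nonnegative literal bound)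
  let top_scores := (PySem.List.sorted feedback_data (fun x => x.2.2) true).take 5
  let grade_count : PySem.Dict String Int :=
    (((((PySem.Dict.empty.insert "A" 0).insert "B" 0).insert "C" 0).insert "D" 0).insert "F" 0)
  let grade_count := feedback_data.foldl pvStepA grade_count
  (top_scores, grade_count.items)

-- ===== PORT B =====
-- count_ge(t) = sum(1 for _, _, s in feedback_data if s >= t)
def pvCountGe (feedback_data : List (String × String × Int)) (t : Int) : Int :=
  (feedback_data.map (fun x => if x.2.2 ≥ t then (1 : Int) else 0)).sum

def summarize_feedback_alt (feedback_data : List (String × String × Int)) :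
    (List (String × String × Int)) × (List (String × Int)) :=
  let top_scores := (PySem.List.sorted feedback_data (fun x => x.2.2) true).take 5
  let n90 := pvCountGe feedback_data 90
  let n80 := pvCountGe feedback_data 80
  let n70 := pvCountGe feedback_data 70
  let n60 := pvCountGe feedback_data 60
  (top_scores,
    [("A", n90), ("B", n80 - n90), ("C", n70 - n80),
     ("D", n60 - n70), ("F", (feedback_data.length : Int) - n60)])

-- ===== PRECONDITION & SPEC =====
def Spec_summarize_feedback (feedback_data : List (String × String × Int)) (out : (List (String × String × Int)) × (List (String × Int))) : Prop := out = summarize_feedback_alt feedback_data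
instance (feedback_data : List (String × String × Int)) (out : (List (String × String × Int)) × (List (String × Int))) : Decidable (Spec_summarize_feedback feedback_data out) := by unfold Spec_summarize_feedback; infer_instance

-- ===== CLAIM (what is proved, stated in full; the proofs are below) =====
def Claim_equal_summarize_feedback : Prop := ∀ (feedback_data : List (String × String × Int)), Dom_summarize_feedback feedback_data → Spec_summarize_feedback feedback_data (summarize_feedback feedback_data)

-- ===== LEMMAS AND PROOFS =====

-- loop invariant: A's grade dict over any list equals the starting values plus the
-- differences of consecutive cumulative threshold counts of that list
theorem pv_loop (l : List (String × String × Int)) :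
    ∀ (a b c d f : Int),
      l.foldl pvStepA (PySem.Dict.mk [("A", a), ("B", b), ("C", c), ("D", d), ("F", f)]) =
      PySem.Dict.mk
        [("A", a + (l.countP (fun x => decide (x.2.2 ≥ 90)) : Int)),
         ("B", b + ((l.countP (fun x => decide (x.2.2 ≥ 80)) : Int) - (l.countP (fun x => decide (x.2.2 ≥ 90)) : Int))),
         ("C", c + ((l.countP (fun x => decide (x.2.2 ≥ 70)) : Int) - (l.countP (fun x => decide (x.2.2 ≥ 80)) : Int))),
         ("D", d + ((l.countP (fun x => decide (x.2.2 ≥ 60)) : Int) - (l.countP (fun x => decide (x.2.2 ≥ 70)) : Int))),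
         ("F", f + ((l.length : Int) - (l.countP (fun x => decide (x.2.2 ≥ 60)) : Int)))] := by
  induction l with
  | nil => intro a b c d f; simp
  | cons x l ih =>
    intro a b c d f
    rw [List.foldl_cons]
    by_cases h90 : x.2.2 ≥ 90
    · have hA : pvStepA (PySem.Dict.mk [("A", a), ("B", b), ("C", c), ("D", d), ("F", f)]) x =
          PySem.Dict.mk [("A", a + 1), ("B", b), ("C", c), ("D", d), ("F", f)] := by
        simp [pvStepA, h90, PySem.Dict.modify, PySem.Dict.insert, PySem.Dict.getD,
          PySem.Dict.get?, PySem.Dict.contains]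
      rw [hA, ih]
      refine congrArg PySem.Dict.mk ?_
      simp only [List.countP_cons, List.length_cons, List.cons.injEq, Prod.mk.injEq,
        h90, decide_true, decide_eq_true_eq, if_pos, and_true, true_and,
        show decide (x.2.2 ≥ 80) = true from by simp; omega,
        show decide (x.2.2 ≥ 70) = true from by simp; omega,
        show decide (x.2.2 ≥ 60) = true from by simp; omega]
      refine ⟨by push_cast; ring, by push_cast; ring, by push_cast; ring,
              by push_cast; ring, by push_cast; ring⟩
    · by_cases h80 : x.2.2 ≥ 80
      · have hA : pvStepA (PySem.Dict.mk [("A", a), ("B", b), ("C", c), ("D", d), ("F", f)]) x =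
            PySem.Dict.mk [("A", a), ("B", b + 1), ("C", c), ("D", d), ("F", f)] := by
          simp [pvStepA, h90, h80, PySem.Dict.modify, PySem.Dict.insert, PySem.Dict.getD,
            PySem.Dict.get?, PySem.Dict.contains]
        rw [hA, ih]
        refine congrArg PySem.Dict.mk ?_
        simp only [List.countP_cons, List.length_cons, List.cons.injEq, Prod.mk.injEq,
          and_true, true_and,
          show decide (x.2.2 ≥ 90) = false from by simp; omega,
          show decide (x.2.2 ≥ 80) = true from by simp; omega,
          show decide (x.2.2 ≥ 70) = true from by simp; omega,
          show decide (x.2.2 ≥ 60) = true from by simp; omega]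
        refine ⟨by push_cast; ring, by push_cast; ring, by push_cast; ring,
                by push_cast; ring, by push_cast; ring⟩
      · by_cases h70 : x.2.2 ≥ 70
        · have hA : pvStepA (PySem.Dict.mk [("A", a), ("B", b), ("C", c), ("D", d), ("F", f)]) x =
              PySem.Dict.mk [("A", a), ("B", b), ("C", c + 1), ("D", d), ("F", f)] := by
            simp [pvStepA, h90, h80, h70, PySem.Dict.modify, PySem.Dict.insert, PySem.Dict.getD,
              PySem.Dict.get?, PySem.Dict.contains]
          rw [hA, ih]
          refine congrArg PySem.Dict.mk ?_
          simp only [List.countP_cons, List.length_cons, List.cons.injEq, Prod.mk.injEq,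
            and_true, true_and,
            show decide (x.2.2 ≥ 90) = false from by simp; omega,
            show decide (x.2.2 ≥ 80) = false from by simp; omega,
            show decide (x.2.2 ≥ 70) = true from by simp; omega,
            show decide (x.2.2 ≥ 60) = true from by simp; omega]
          refine ⟨by push_cast; ring, by push_cast; ring, by push_cast; ring,
                  by push_cast; ring, by push_cast; ring⟩
        · by_cases h60 : x.2.2 ≥ 60
          · have hA : pvStepA (PySem.Dict.mk [("A", a), ("B", b), ("C", c), ("D", d), ("F", f)]) x =
                PySem.Dict.mk [("A", a), ("B", b), ("C", c), ("D", d + 1), ("F", f)] := by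
              simp [pvStepA, h90, h80, h70, h60, PySem.Dict.modify, PySem.Dict.insert,
                PySem.Dict.getD, PySem.Dict.get?, PySem.Dict.contains]
            rw [hA, ih]
            refine congrArg PySem.Dict.mk ?_
            simp only [List.countP_cons, List.length_cons, List.cons.injEq, Prod.mk.injEq,
              and_true, true_and,
              show decide (x.2.2 ≥ 90) = false from by simp; omega,
              show decide (x.2.2 ≥ 80) = false from by simp; omega,
              show decide (x.2.2 ≥ 70) = false from by simp; omega,
              show decide (x.2.2 ≥ 60) = true from by simp; omega]
            refine ⟨by push_cast; ring, by push_cast; ring, by push_cast; ring,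
                    by push_cast; ring, by push_cast; ring⟩
          · have hA : pvStepA (PySem.Dict.mk [("A", a), ("B", b), ("C", c), ("D", d), ("F", f)]) x =
                PySem.Dict.mk [("A", a), ("B", b), ("C", c), ("D", d), ("F", f + 1)] := by
              simp [pvStepA, h90, h80, h70, h60, PySem.Dict.modify, PySem.Dict.insert,
                PySem.Dict.getD, PySem.Dict.get?, PySem.Dict.contains]
            rw [hA, ih]
            refine congrArg PySem.Dict.mk ?_
            simp only [List.countP_cons, List.length_cons, List.cons.injEq, Prod.mk.injEq,
              and_true, true_and,
              show decide (x.2.2 ≥ 90) = false from by simp; omega,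
              show decide (x.2.2 ≥ 80) = false from by simp; omega,
              show decide (x.2.2 ≥ 70) = false from by simp; omega,
              show decide (x.2.2 ≥ 60) = false from by simp; omega]
            refine ⟨by push_cast; ring, by push_cast; ring, by push_cast; ring,
                    by push_cast; ring, by push_cast; ring⟩

-- ===== VERDICT (by name: the statement is the Claim_ definition above) =====
theorem summarize_feedback_spec : Claim_equal_summarize_feedback := by
  intro fd _
  unfold Spec_summarize_feedback summarize_feedback summarize_feedback_alt
  refine Prod.ext rfl ?_
  show (fd.foldl pvStepA
      (((((PySem.Dict.empty.insert "A" 0).insert "B" 0).insert "C" 0).insert "D" 0).insert "F" 0)).items = _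
  rw [show (((((PySem.Dict.empty.insert "A" (0:Int)).insert "B" 0).insert "C" 0).insert "D" 0).insert "F" 0)
      = PySem.Dict.mk [("A",0),("B",0),("C",0),("D",0),("F",0)] from rfl, pv_loop fd 0 0 0 0 0]
  have h := fun t => PySem.List.sum_map_ite_one_zero
    (fun x : String × String × Int => decide (x.2.2 ≥ t)) fd
  simp only [decide_eq_true_eq] at h
  simp [pvCountGe, ← h]
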